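-- pv_equiv track=rewrite | github.com/AtomThum/PDFMetadataEditor | bookmarks.py | find_text_range_in_list
-- ===== SOURCE A (Python) =====
-- def find_text_range_in_list(
--     target_list: list[str], target_str: str
-- ) -> tuple[int | None, int | None]:
--     does_text_contain_str: list[bool] = [
--         True if (target_str in text) else False for text in target_list
--     ]
--     try:
--         start_index: int | None = does_text_contain_str.index(True)
--         end_index: int | None = len(does_text_contain_str) - does_text_contain_str[
--             ::-1
--         ].index(True)
--     except ValueError:
--         start_index = None
--         end_index = None
--     return start_index, end_index
-- ===== SOURCE B (Python) =====
-- def find_text_range_in_list(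
--     target_list: list[str], target_str: str
-- ) -> tuple[int | None, int | None]:
--     first = None
--     last = None
--     for i, text in enumerate(target_list):
--         if target_str in text:
--             if first is None:
--                 first = i
--             last = i
--     if first is None:
--         return None, None
--     return first, last + 1
-- ===== Notes on version B (the rewrite author's own statement) =====
-- stated objective: simpler
-- what changed: Replaced the boolean-list comprehension plus forward .index and reversed-copy .index scans (and the try/except) with a single forward pass that maintains running first/last match indices and returns (first, last + 1).
import Mathlib
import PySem

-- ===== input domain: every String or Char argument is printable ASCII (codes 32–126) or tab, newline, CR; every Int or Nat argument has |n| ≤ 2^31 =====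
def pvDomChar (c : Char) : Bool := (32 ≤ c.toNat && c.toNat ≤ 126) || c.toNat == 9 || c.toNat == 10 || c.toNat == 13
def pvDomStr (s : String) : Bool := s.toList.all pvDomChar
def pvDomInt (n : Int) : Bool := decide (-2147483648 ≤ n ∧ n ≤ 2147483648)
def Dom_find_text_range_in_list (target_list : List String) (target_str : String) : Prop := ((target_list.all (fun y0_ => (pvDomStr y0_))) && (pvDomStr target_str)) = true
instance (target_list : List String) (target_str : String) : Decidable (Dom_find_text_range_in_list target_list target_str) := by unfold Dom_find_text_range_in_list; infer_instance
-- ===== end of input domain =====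

-- B replaces A's boolean-list comprehension, forward .index and reversed-copy .index
-- (with try/except) by a single forward pass keeping running first/last match indices.

-- ===== PORT A =====
-- faithful to Source A: build the bool list, index the first True, index the first True
-- of the reversed copy ([::-1] ported as PySem.List.slice? with step -1); the
-- ValueError branch (no True) yields (none, none).
def find_text_range_in_list (target_list : List String) (target_str : String) : Option Int × Option Int :=
  let does_text_contain_str : List Bool :=
    target_list.map (fun text => if PySem.Str.isIn target_str text then true else false)
  match PySem.List.index? does_text_contain_str true,
        PySem.List.index? ((PySem.List.slice? does_text_contain_str none none (-1)).getD []) true with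
  | some s, some r =>
      (some (s : Int), some ((does_text_contain_str.length : Int) - (r : Int)))
  | _, _ => (none, none)

-- ===== PORT B =====
-- faithful to Source B: one foldl over enumerate(target_list) carrying (first, last).
def find_text_range_in_list_alt (target_list : List String) (target_str : String) : Option Int × Option Int :=
  let st :=
    (PySem.List.enumerate target_list 0).foldl
      (fun (st : Option Int × Option Int) p =>
        if PySem.Str.isIn target_str p.2 then
          ((if st.1.isNone then some p.1 else st.1), some p.1)
        else st)
      (none, none)
  if st.1 = none then (none, none) else (st.1, st.2.map (fun l => l + 1))

-- ===== PRECONDITION & SPEC =====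
def Spec_find_text_range_in_list (target_list : List String) (target_str : String) (out : Option Int × Option Int) : Prop := out = find_text_range_in_list_alt target_list target_str
instance (target_list : List String) (target_str : String) (out : Option Int × Option Int) : Decidable (Spec_find_text_range_in_list target_list target_str out) := by unfold Spec_find_text_range_in_list; infer_instance

-- ===== CLAIM (what is proved, stated in full; the proofs are below) =====
def Claim_equal_find_text_range_in_list : Prop := ∀ (target_list : List String) (target_str : String), Dom_find_text_range_in_list target_list target_str → Spec_find_text_range_in_list target_list target_str (find_text_range_in_list target_list target_str)

-- ===== LEMMAS AND PROOFS =====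

-- first match index (offset k), the value B's running `first` ends with
def firstIdxP (p : String → Bool) : List String → Int → Option Int
  | [], _ => none
  | x :: xs, k => if p x then some k else firstIdxP p xs (k + 1)

-- last match index (offset k), the value B's running `last` ends with
def lastIdxP (p : String → Bool) : List String → Int → Option Int
  | [], _ => none
  | x :: xs, k =>
      match lastIdxP p xs (k + 1) with
      | some l => some l
      | none => if p x then some k else none

theorem firstIdxP_eq_index? (p : String → Bool) (xs : List String) (k : Int) :
    firstIdxP p xs k
      = (PySem.List.index? (xs.map p) true).map (fun n : Nat => k + (n : Int)) := by
  induction xs generalizing k with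
  | nil => simp [firstIdxP, PySem.List.index?]
  | cons x xs ih =>
      by_cases hx : p x = true
      · simp only [List.map_cons, hx, firstIdxP, if_true, PySem.List.index?_cons_self,
          Option.map_some, Int.natCast_zero, Int.add_zero]
      · have hx' : p x = false := by cases hpx : p x <;> simp_all
        rw [List.map_cons, hx', PySem.List.index?_cons_of_ne _ (by simp)]
        simp only [firstIdxP, hx', if_false, Bool.false_eq_true, ih, Option.map_map]
        cases PySem.List.index? (xs.map p) true with
        | none => rfl
        | some n => simp only [Option.map_some, Function.comp]; congr 1; push_cast; ring

theorem lastIdxP_eq_index?_rev (p : String → Bool) (xs : List String) (k : Int) :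
    lastIdxP p xs k
      = (PySem.List.index? (xs.map p).reverse true).map
          (fun r : Nat => k + (xs.length : Int) - 1 - (r : Int)) := by
  induction xs generalizing k with
  | nil => simp [lastIdxP, PySem.List.index?]
  | cons x xs ih =>
      rw [List.map_cons, List.reverse_cons]
      by_cases hmem : true ∈ (xs.map p).reverse
      · rw [PySem.List.index?_append_of_mem _ hmem]
        cases hr : PySem.List.index? (xs.map p).reverse true with
        | none =>
            exact absurd ((PySem.List.index?_eq_none_iff _ _).1 hr hmem) (by simp)
        | some r =>
            have hx : lastIdxP p xs (k + 1) = some ((k + 1) + (xs.length : Int) - 1 - (r : Int)) := by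
              rw [ih (k + 1), hr]; rfl
            simp only [lastIdxP, hx, Option.map_some, List.length_cons]
            congr 1
            push_cast
            ring
      · have hnone : PySem.List.index? (xs.map p).reverse true = none :=
          (PySem.List.index?_eq_none_iff _ _).2 hmem
        have hx : lastIdxP p xs (k + 1) = none := by
          rw [ih (k + 1), hnone]; rfl
        by_cases hb : p x = true
        · rw [hb, PySem.List.index?_append_singleton_self _ _ hmem]
          simp only [lastIdxP, hx, hb, if_true, Option.map_some, List.length_cons,
            List.length_reverse, List.length_map]
          congr 1
          push_cast
          ring
        · have hbx : p x = false := by cases hpx : p x <;> simp_all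
          have hall : PySem.List.index? ((xs.map p).reverse ++ [false]) true = none := by
            rw [PySem.List.index?_eq_none_iff]
            simp [hmem]
          simp only [lastIdxP, hx, hbx, Bool.false_eq_true, if_false, hall, Option.map_none]

-- B's fold, generalized over the predicate, start offset and the carried state
theorem alt_fold_spec (p : String → Bool) (xs : List String) (k : Int)
    (st : Option Int × Option Int) :
    (PySem.List.enumerate xs k).foldl
      (fun (st : Option Int × Option Int) q =>
        if p q.2 then ((if st.1.isNone then some q.1 else st.1), some q.1) else st) st
    = ((match st.1 with | some f => some f | none => firstIdxP p xs k),
       (match lastIdxP p xs k with | some l => some l | none => st.2)) := by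
  induction xs generalizing k st with
  | nil =>
      obtain ⟨f, l⟩ := st
      cases f <;> simp [firstIdxP, lastIdxP, PySem.List.enumerate_nil]
  | cons x xs ih =>
      rw [PySem.List.enumerate_cons, List.foldl_cons, ih]
      by_cases hx : p x = true
      · simp only [hx, if_true, firstIdxP, lastIdxP]
        cases st1 : st.1 with
        | none =>
            simp only [Option.isNone_none, if_true]
            cases lastIdxP p xs (k + 1) <;> simp
        | some f =>
            simp only [Option.isNone_some, Bool.false_eq_true, if_false]
            cases lastIdxP p xs (k + 1) <;> simp
      · have hx' : p x = false := by cases hpx : p x <;> simp_all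
        simp only [hx', if_false, Bool.false_eq_true, firstIdxP, lastIdxP]
        cases lastIdxP p xs (k + 1) <;> simp

-- the two optional indices are none together
theorem firstIdxP_none_iff_lastIdxP_none (p : String → Bool) (xs : List String) (k k' : Int) :
    (firstIdxP p xs k = none ↔ lastIdxP p xs k' = none) := by
  rw [firstIdxP_eq_index?, lastIdxP_eq_index?_rev, Option.map_eq_none_iff,
    Option.map_eq_none_iff, PySem.List.index?_eq_none_iff, PySem.List.index?_eq_none_iff]
  simp

-- ===== VERDICT (by name: the statement is the Claim_ definition above) =====
theorem find_text_range_in_list_spec : Claim_equal_find_text_range_in_list := by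
  intro tl ts _
  show find_text_range_in_list tl ts = find_text_range_in_list_alt tl ts
  have hmap : (fun text => if PySem.Str.isIn ts text then true else false)
      = (fun t => PySem.Str.isIn ts t) := by
    funext t
    cases h : PySem.Str.isIn ts t <;> rfl
  simp only [find_text_range_in_list, find_text_range_in_list_alt]
  rw [hmap, PySem.List.slice?_none_none_neg_one, Option.getD_some,
    alt_fold_spec (fun t => PySem.Str.isIn ts t) tl 0 (none, none)]
  cases hA : PySem.List.index? (tl.map (fun t => PySem.Str.isIn ts t)) true with
  | none =>
      have h1 : firstIdxP (fun t => PySem.Str.isIn ts t) tl 0 = none := by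
        rw [firstIdxP_eq_index?, hA]; rfl
      have h2 : lastIdxP (fun t => PySem.Str.isIn ts t) tl 0 = none :=
        (firstIdxP_none_iff_lastIdxP_none _ tl 0 0).1 h1
      rw [h1, h2]
      rfl
  | some s =>
      have h1 : firstIdxP (fun t => PySem.Str.isIn ts t) tl 0 = some (s : Int) := by
        rw [firstIdxP_eq_index?, hA]
        simp
      cases hB : PySem.List.index? (tl.map (fun t => PySem.Str.isIn ts t)).reverse true with
      | none =>
          have h2 : lastIdxP (fun t => PySem.Str.isIn ts t) tl 0 = none := by
            rw [lastIdxP_eq_index?_rev, hB]; rfl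
          have h1' := (firstIdxP_none_iff_lastIdxP_none
            (fun t => PySem.Str.isIn ts t) tl 0 0).2 h2
          rw [h1] at h1'
          exact absurd h1' (by simp)
      | some r =>
          have h3 : lastIdxP (fun t => PySem.Str.isIn ts t) tl 0
              = some (0 + (tl.length : Int) - 1 - (r : Int)) := by
            rw [lastIdxP_eq_index?_rev, hB]; rfl
          have harith : (0 + (tl.length : Int) - 1 - (r : Int)) + 1
              = (tl.length : Int) - (r : Int) := by ring
          rw [h1, h3]
          simp only [List.length_map, Option.map_some, harith]
          rfl
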